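-- pv_equiv track=rewrite | github.com/Anoymous1024/SA-Test-Fix | detect.py | analyze_defects
-- ===== SOURCE A (Python) =====
-- from typing import List, Tuple, Dict, Any, Optional, Union
--
-- def analyze_defects(defect_cases: List[Tuple]) -> Dict[str, Dict[str, int]]:
--     """
--     Analyze defect cases by test type and relation type.
--
--     Args:
--         defect_cases: List of defect cases
--
--     Returns:
--         Dictionary of defect statistics
--     """
--     stats = {
--         "by_test_type": {},
--         "by_relation_type": {
--             "identity": 0,
--             "inequality": 0
--         }
--     }
--
--     for _, _, _, relation_type, test_name in defect_cases:
--         # Count by relation type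
--         if relation_type == "identity":
--             stats["by_relation_type"]["identity"] += 1
--         else:
--             stats["by_relation_type"]["inequality"] += 1
--
--         # Count by test type
--         if test_name not in stats["by_test_type"]:
--             stats["by_test_type"][test_name] = 0
--
--         stats["by_test_type"][test_name] += 1
--
--     return stats
-- ===== SOURCE B (Python) =====
-- from typing import List, Tuple, Dict
-- from collections import Counter
--
-- def analyze_defects(defect_cases: List[Tuple]) -> Dict[str, Dict[str, int]]:
--     by_test_type = dict(Counter(test_name for _, _, _, _, test_name in defect_cases))
--     identity = sum(1 for _, _, _, relation_type, _ in defect_cases if relation_type == "identity")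
--     return {
--         "by_test_type": by_test_type,
--         "by_relation_type": {
--             "identity": identity,
--             "inequality": len(defect_cases) - identity,
--         },
--     }
-- ===== Notes on version B (the rewrite author's own statement) =====
-- stated objective: idiomatic
-- what changed: Replaces the single loop that maintains three counters with separate declarative passes: Counter over the test names for by_test_type, a sum over a filtered generator for the identity count, and inequality derived as len(defect_cases) - identity.
import Mathlib
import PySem

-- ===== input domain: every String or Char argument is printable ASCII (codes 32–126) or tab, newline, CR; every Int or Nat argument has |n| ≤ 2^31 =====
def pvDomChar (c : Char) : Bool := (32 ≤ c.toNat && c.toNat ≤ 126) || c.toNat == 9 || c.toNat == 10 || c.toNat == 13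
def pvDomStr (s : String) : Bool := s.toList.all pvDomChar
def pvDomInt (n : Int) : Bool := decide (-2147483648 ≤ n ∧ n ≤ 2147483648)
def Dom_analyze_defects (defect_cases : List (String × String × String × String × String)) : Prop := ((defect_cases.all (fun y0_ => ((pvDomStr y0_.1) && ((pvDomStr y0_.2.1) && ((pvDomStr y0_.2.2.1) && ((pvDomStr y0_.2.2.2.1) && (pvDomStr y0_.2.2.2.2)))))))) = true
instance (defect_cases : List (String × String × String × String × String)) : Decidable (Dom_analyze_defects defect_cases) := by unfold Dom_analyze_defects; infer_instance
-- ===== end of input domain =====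

-- B replaces A's single loop maintaining three counters with separate passes
-- (Counter for by_test_type, a filtered sum for identity, subtraction for inequality);
-- objective: idiomatic, same O(n) cost.

-- ===== PORT A =====
-- single fold over the cases maintaining (by_test dict, identity count, inequality count)
def analyze_defects (defect_cases : List (String × String × String × String × String)) : List (String × List (String × Int)) :=
  let st := defect_cases.foldl (fun (st : PySem.Dict String Int × Int × Int) c =>
      let (bt, ident, ineq) := st
      let (ident, ineq) := if c.2.2.2.1 == "identity" then (ident + 1, ineq) else (ident, ineq + 1)
      let bt := if bt.contains c.2.2.2.2 then bt else bt.insert c.2.2.2.2 0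
      let bt := bt.insert c.2.2.2.2 (bt.getD c.2.2.2.2 0 + 1)
      (bt, ident, ineq))
    (PySem.Dict.empty, 0, 0)
  [("by_test_type", st.1.items), ("by_relation_type", [("identity", st.2.1), ("inequality", st.2.2)])]

-- ===== PORT B =====
-- separate passes: Counter over the test names, a filtered sum for identity, subtraction for inequality
def analyze_defects_alt (defect_cases : List (String × String × String × String × String)) : List (String × List (String × Int)) :=
  let by_test_type := PySem.Dict.counter (defect_cases.map (fun c => c.2.2.2.2))
  let identity := ((defect_cases.filter (fun c => c.2.2.2.1 == "identity")).map (fun _ => (1 : Int))).sum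
  [("by_test_type", by_test_type.items),
   ("by_relation_type", [("identity", identity), ("inequality", (defect_cases.length : Int) - identity)])]

-- ===== PRECONDITION & SPEC =====
def Spec_analyze_defects (defect_cases : List (String × String × String × String × String)) (out : List (String × List (String × Int))) : Prop := out = analyze_defects_alt defect_cases
instance (defect_cases : List (String × String × String × String × String)) (out : List (String × List (String × Int))) : Decidable (Spec_analyze_defects defect_cases out) := by unfold Spec_analyze_defects; infer_instance

-- ===== CLAIM (what is proved, stated in full; the proofs are below) =====
def Claim_equal_analyze_defects : Prop := ∀ (defect_cases : List (String × String × String × String × String)), Dom_analyze_defects defect_cases → Spec_analyze_defects defect_cases (analyze_defects defect_cases)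

-- ===== LEMMAS AND PROOFS =====

-- A's "insert 0 if missing, then += 1" is one overwrite-insert with the incremented count
theorem pv_step_eq (d : PySem.Dict String Int) (n : String) :
    (let d1 := if d.contains n then d else d.insert n 0
     d1.insert n (d1.getD n 0 + 1)) = d.insert n (d.getD n 0 + 1) := by
  show (if d.contains n then d else d.insert n 0).insert n
      ((if d.contains n then d else d.insert n 0).getD n 0 + 1) = _
  by_cases h : d.contains n = true
  · rw [if_pos h]
  · rw [if_neg (by simp [h]), PySem.Dict.getD_insert_self, PySem.Dict.insert_insert_self,
      PySem.Dict.getD_of_not_contains d 0 (eq_false_of_ne_true h)]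

theorem pv_fold_split (l : List (String × String × String × String × String))
    (bt : PySem.Dict String Int) (i j : Int) :
    l.foldl (fun (st : PySem.Dict String Int × Int × Int) c =>
      let (bt, ident, ineq) := st
      let (ident, ineq) := if c.2.2.2.1 == "identity" then (ident + 1, ineq) else (ident, ineq + 1)
      let bt := if bt.contains c.2.2.2.2 then bt else bt.insert c.2.2.2.2 0
      let bt := bt.insert c.2.2.2.2 (bt.getD c.2.2.2.2 0 + 1)
      (bt, ident, ineq)) (bt, i, j)
    = ((l.map (fun c => c.2.2.2.2)).foldl (fun d x => d.insert x (d.getD x 0 + 1)) bt,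
       i + (l.countP (fun c => c.2.2.2.1 == "identity") : Int),
       j + ((l.length : Int) - (l.countP (fun c => c.2.2.2.1 == "identity") : Int))) := by
  induction l generalizing bt i j with
  | nil => simp
  | cons c t ih =>
    simp only [List.foldl_cons, List.map_cons, List.countP_cons, List.length_cons]
    rw [ih]
    by_cases h : (c.2.2.2.1 == "identity") = true <;> simp [h, pv_step_eq] <;> ring

-- ===== VERDICT (by name: the statement is the Claim_ definition above) =====
theorem analyze_defects_spec : Claim_equal_analyze_defects := by
  intro l _
  unfold Spec_analyze_defects analyze_defects analyze_defects_alt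
  simp only [pv_fold_split, PySem.Dict.foldl_insert_getD_add_one_eq_counter,
    PySem.List.sum_map_const_int, List.countP_eq_length_filter, zero_add, mul_one]
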